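-- pv_equiv track=rewrite | github.com/TheNitG/CourseOpeningsBot | Tictactoe.py | distinct_final_boards_X_wins
-- ===== SOURCE A (Python) =====
-- from collections import deque
--
-- def goal_test(board):
--     if board[0:3] == "XXX" or board[3:6] == "XXX" or board[6:9] == "XXX" or board[::3] == "XXX" or board[1::3] == "XXX"\
--             or board[2::3] == "XXX" or board[0] == "X" and board[4] == "X" and board[8] == "X" or board[2] == "X"\
--             and board[4] == "X" and board[6] == "X":
--         return "X wins"
--     if board[0:3] == "OOO" or board[3:6] == "OOO" or board[6:9] == "OOO" or board[::3] == "OOO" or board[1::3] == "OOO"\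
--             or board[2::3] == "OOO" or board[0] == "O" and board[4] == "O" and board[8] == "O" or board[2] == "O"\
--             and board[4] == "O" and board[6] == "O":
--         return "O wins"
--     if "." in board:
--         return "Not finished"
--     return "Tie"
--
-- def possible_moves(board, turn):
--     moves = set()
--     for index, char in enumerate(board):
--         if char == ".":
--             moves.add(board[:index] + turn + board[index + 1:])
--     return moves
--
-- def distinct_final_boards_X_wins(steps):
--     queue = deque([(".........", "X", 0)])
--     final_boards = {"........."}
--     count = 0
--     while queue:
--         current_board, current_turn, step_count = queue.popleft()
--         for child_node in possible_moves(current_board, current_turn):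
--             if not goal_test(child_node) == "Not finished":
--                 if child_node not in final_boards:
--                     if goal_test(child_node) == "X wins" and step_count + 1 == steps:
--                         count += 1
--                         final_boards.add(child_node)
--                 continue
--             if current_turn == "X":
--                 queue.append((child_node, "O", step_count + 1))
--             else:
--                 queue.append((child_node, "X", step_count + 1))
--     return count
-- ===== SOURCE B (Python) =====
-- def goal_test(board):
--     if board[0:3] == "XXX" or board[3:6] == "XXX" or board[6:9] == "XXX" or board[::3] == "XXX" or board[1::3] == "XXX"\
--             or board[2::3] == "XXX" or board[0] == "X" and board[4] == "X" and board[8] == "X" or board[2] == "X"\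
--             and board[4] == "X" and board[6] == "X":
--         return "X wins"
--     if board[0:3] == "OOO" or board[3:6] == "OOO" or board[6:9] == "OOO" or board[::3] == "OOO" or board[1::3] == "OOO"\
--             or board[2::3] == "OOO" or board[0] == "O" and board[4] == "O" and board[8] == "O" or board[2] == "O"\
--             and board[4] == "O" and board[6] == "O":
--         return "O wins"
--     if "." in board:
--         return "Not finished"
--     return "Tie"
--
-- def possible_moves(board, turn):
--     moves = set()
--     for index, char in enumerate(board):
--         if char == ".":
--             moves.add(board[:index] + turn + board[index + 1:])
--     return moves
--
-- def distinct_final_boards_X_wins(steps):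
--     # Level-by-level BFS over SETS of board states: each reachable ongoing
--     # position is expanded once per level, instead of once per path to it.
--     if steps < 1:
--         return 0
--     frontier = {"........."}
--     for k in range(1, steps):
--         turn = "X" if k % 2 == 1 else "O"
--         nxt = set()
--         for b in frontier:
--             for child in possible_moves(b, turn):
--                 if goal_test(child) == "Not finished":
--                     nxt.add(child)
--         frontier = nxt
--         if not frontier:
--             return 0
--     turn = "X" if steps % 2 == 1 else "O"
--     wins = set()
--     for b in frontier:
--         for child in possible_moves(b, turn):
--             if goal_test(child) == "X wins":
--                 wins.add(child)
--     return len(wins)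
-- ===== Notes on version B (the rewrite author's own statement) =====
-- stated objective: faster
-- what changed: A runs a path-wise BFS whose queue holds every move sequence separately (~295k pops, exponential-style redundancy); B advances a SET of distinct reachable ongoing boards level by level (each board state expanded once per level, a few thousand expansions total) and counts the distinct X-win children at the target level.
import Mathlib
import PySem

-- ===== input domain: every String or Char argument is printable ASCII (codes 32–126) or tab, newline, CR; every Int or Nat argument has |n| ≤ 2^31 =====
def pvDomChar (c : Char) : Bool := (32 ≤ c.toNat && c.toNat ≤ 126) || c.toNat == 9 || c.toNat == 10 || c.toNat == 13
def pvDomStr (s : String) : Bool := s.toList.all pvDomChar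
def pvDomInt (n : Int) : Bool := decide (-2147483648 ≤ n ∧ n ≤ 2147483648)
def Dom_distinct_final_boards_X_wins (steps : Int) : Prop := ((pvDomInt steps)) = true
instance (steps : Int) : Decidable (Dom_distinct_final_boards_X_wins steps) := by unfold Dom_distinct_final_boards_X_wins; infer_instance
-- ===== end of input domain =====

-- B replaces A's path-wise BFS (every move sequence enqueued separately) by a level-by-level
-- BFS over SETS of distinct board states, which is measurably faster (each state expanded once per level).

-- ===== PORT A =====
-- Shared same-module helpers of the Python file, used verbatim by both A and B.
-- Each Python comparison in goal_test is ported as the equivalent indexed code-point test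
-- (exact for every string):  board[a:a+3] == "ccc"  iff  l[a]? = c and l[a+1]? = c and l[a+2]? = c
-- (a slice equals a 3-char string iff those three positions exist and match), and
-- board[i::3] == "ccc"  iff  l[i]? = c, l[i+3]? = c, l[i+6]? = c and l[i+9]? = none (no 4th element).
-- This indexed form is used instead of PySem.Chars.slice/slice? only because the BFS of port A
-- evaluates goal_test millions of times in the differential test.
def tttLine (l : List Char) (c : Char) (i j k : Nat) : Bool :=
  l[i]? == some c && l[j]? == some c && l[k]? == some c

-- board[0] == "X" and board[4] == "X" and board[8] == "X" (and the other diagonal) are the same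
-- indexed tests; on boards shorter than 9 Python would raise IndexError where l[i]? is none —
-- both programs only apply goal_test to 9-char boards.  "." in board is a single-character
-- membership test.
def goal_test (board : String) : String :=
  let l := board.toList
  if tttLine l 'X' 0 1 2 || tttLine l 'X' 3 4 5 || tttLine l 'X' 6 7 8
      || (tttLine l 'X' 0 3 6 && l[9]? == none) || (tttLine l 'X' 1 4 7 && l[10]? == none)
      || (tttLine l 'X' 2 5 8 && l[11]? == none)
      || tttLine l 'X' 0 4 8 || tttLine l 'X' 2 4 6 then
    "X wins"
  else if tttLine l 'O' 0 1 2 || tttLine l 'O' 3 4 5 || tttLine l 'O' 6 7 8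
      || (tttLine l 'O' 0 3 6 && l[9]? == none) || (tttLine l 'O' 1 4 7 && l[10]? == none)
      || (tttLine l 'O' 2 5 8 && l[11]? == none)
      || tttLine l 'O' 0 4 8 || tttLine l 'O' 2 4 6 then
    "O wins"
  else if l.contains '.' then "Not finished"
  else "Tie"

def possible_moves (board turn : String) : PySem.Set String :=
  (PySem.List.enumerate board.toList 0).foldl
    (fun moves p =>
      if p.2 == '.' then
        PySem.Set.add moves (PySem.Str.slice board none (some p.1) ++ turn ++ PySem.Str.slice board (some (p.1 + 1)) none)
      else moves)
    PySem.Set.empty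

-- A's while-loop over the deque.  The deque is ported as the classic two-list functional queue
-- (pop from `front`; append = cons onto `back`, which holds the right end reversed; refill `front`
-- from `back.reverse` when it empties) so that popleft/append stay O(1) as for collections.deque;
-- tttPop is exactly the popleft of that representation.  The loop takes a fuel argument; the fuel
-- literal 10^10 bounds the number of pops (the measure sum of 10^(dots b + 1) over the queue of the
-- initial queue, proved decreasing below), so the exhaustion branch is never taken from the entry point.
-- The Python iterates 'for child_node in possible_moves(...)' over a set; the count returned is
-- independent of that iteration order (that is what the theorems below establish); the port
-- iterates in the set's insertion order.
def tttPop (front back : List (String × String × Int)) :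
    Option ((String × String × Int) × List (String × String × Int) × List (String × String × Int)) :=
  match front with
  | e :: fr => some (e, fr, back)
  | [] =>
    match back.reverse with
    | [] => none
    | e :: fr => some (e, fr, [])

def tttLoopA (steps : Int) : Nat → List (String × String × Int) → List (String × String × Int) → PySem.Set String → Int → Int
  | 0, _, _, _, count => count
  | fuel+1, front, back, final_boards, count =>
    match tttPop front back with
    | none => count
    | some ((current_board, current_turn, step_count), front', back') =>
      let st := (possible_moves current_board current_turn).foldl
        (fun (st : List (String × String × Int) × PySem.Set String × Int) child_node =>
          if !(goal_test child_node == "Not finished") then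
            if !(PySem.Set.contains st.2.1 child_node) && goal_test child_node == "X wins"
                && step_count + 1 == steps then
              (st.1, PySem.Set.add st.2.1 child_node, st.2.2 + 1)
            else st
          else if current_turn == "X" then ((child_node, "O", step_count + 1) :: st.1, st.2.1, st.2.2)
          else ((child_node, "X", step_count + 1) :: st.1, st.2.1, st.2.2))
        (back', final_boards, count)
      tttLoopA steps fuel front' st.1 st.2.1 st.2.2

def distinct_final_boards_X_wins (steps : Int) : Int :=
  tttLoopA steps 10000000000 [(".........", "X", 0)] [] (PySem.Set.ofList ["........."]) 0

-- ===== PORT B =====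
def tttNext (frontier : PySem.Set String) (turn : String) : PySem.Set String :=
  frontier.foldl (fun nxt b =>
    (possible_moves b turn).foldl (fun nxt child =>
      if goal_test child == "Not finished" then PySem.Set.add nxt child else nxt) nxt)
    PySem.Set.empty

def tttWins (frontier : PySem.Set String) (turn : String) : PySem.Set String :=
  frontier.foldl (fun wins b =>
    (possible_moves b turn).foldl (fun wins child =>
      if goal_test child == "X wins" then PySem.Set.add wins child else wins) wins)
    PySem.Set.empty

-- the 'for k in range(1, steps)' loop with its early 'return 0' when the frontier empties
def tttBLoop : Nat → Int → PySem.Set String → Option (PySem.Set String)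
  | 0, _, frontier => some frontier
  | n+1, k, frontier =>
    let turn := if PySem.Int.mod k 2 == 1 then "X" else "O"
    let nxt := tttNext frontier turn
    if nxt.isEmpty then none else tttBLoop n (k+1) nxt

def distinct_final_boards_X_wins_alt (steps : Int) : Int :=
  if steps < 1 then 0
  else
    match tttBLoop (steps - 1).toNat 1 (PySem.Set.ofList ["........."]) with
    | none => 0
    | some frontier =>
      let turn := if PySem.Int.mod steps 2 == 1 then "X" else "O"
      PySem.Set.len (tttWins frontier turn)

-- ===== PRECONDITION & SPEC =====
def Spec_distinct_final_boards_X_wins (steps : Int) (out : Int) : Prop := out = distinct_final_boards_X_wins_alt steps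
instance (steps : Int) (out : Int) : Decidable (Spec_distinct_final_boards_X_wins steps out) := by unfold Spec_distinct_final_boards_X_wins; infer_instance

-- ===== CLAIM (what is proved, stated in full; the proofs are below) =====
def Claim_equal_distinct_final_boards_X_wins : Prop := ∀ (steps : Int), Dom_distinct_final_boards_X_wins steps → Spec_distinct_final_boards_X_wins steps (distinct_final_boards_X_wins steps)

-- ===== LEMMAS AND PROOFS =====

-- Abbreviations for the two goal_test outcomes the programs branch on, the '.'-count of a board,
-- and the turn flip both programs perform.
def tttNF (c : String) : Bool := goal_test c == "Not finished"
def tttXW (c : String) : Bool := goal_test c == "X wins"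
def tttDots (b : String) : Nat := b.toList.count '.'
def tttFlip (t : String) : String := if t == "X" then "O" else "X"
def tttWFt (t : String) : Prop := t = "X" ∨ t = "O"
def tttXwinC (b t : String) : Finset String := ((possible_moves b t).filter tttXW).toFinset

-- The common mathematical object both programs compute with: tttW1 steps n b t s is the set of
-- X-win boards produced at move number `steps` along play continuations of board b (turn t to move,
-- b holding s pieces), where every intermediate board is "Not finished"; n is structural fuel
-- (any n ≥ tttDots b gives the true set, proved below).
mutual
def tttW1 (steps : Int) : Nat → String → String → Int → Finset String
  | 0, _, _, _ => ∅
  | n+1, b, t, s =>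
    (if s + 1 = steps then tttXwinC b t else ∅) ∪
    tttWL steps n ((possible_moves b t).filter tttNF) (tttFlip t) (s + 1)
def tttWL (steps : Int) : Nat → List String → String → Int → Finset String
  | _, [], _, _ => ∅
  | n, b :: bs, t, s => tttW1 steps n b t s ∪ tttWL steps n bs t s
end

def tttWE (steps : Int) (e : String × String × Int) : Finset String := tttW1 steps 9 e.1 e.2.1 e.2.2
def tttBigW (steps : Int) (q : List (String × String × Int)) : Finset String :=
  q.foldr (fun e acc => tttWE steps e ∪ acc) ∅
def tttU (steps : Int) (l : List String) (t : String) (s : Int) : Finset String :=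
  l.foldr (fun b acc => tttW1 steps 9 b t s ∪ acc) ∅
def tttOK (e : String × String × Int) : Prop := tttWFt e.2.1 ∧ tttDots e.1 ≤ 9
def tttM (q : List (String × String × Int)) : Nat := (q.map (fun e => 10 ^ (tttDots e.1 + 1))).sum

-- ---- facts about possible_moves ----
lemma ttt_flip_wf (t : String) : tttWFt (tttFlip t) := by
  unfold tttFlip tttWFt; split <;> simp

-- one conditional set-building foldl, used by possible_moves and by B's two set builders
lemma ttt_fold_add {β : Type} (p : β → Bool) (f : β → String) :
    ∀ (L : List β) (s0 : PySem.Set String), s0.Nodup →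
      (L.foldl (fun s x => if p x then PySem.Set.add s (f x) else s) s0).Nodup
      ∧ (∀ y, y ∈ L.foldl (fun s x => if p x then PySem.Set.add s (f x) else s) s0
            ↔ y ∈ s0 ∨ ∃ x ∈ L, p x ∧ y = f x)
      ∧ (L.foldl (fun s x => if p x then PySem.Set.add s (f x) else s) s0).length
          ≤ s0.length + (L.filter p).length := by
  intro L
  induction L with
  | nil => intro s0 h; simp [h]
  | cons x L ih =>
    intro s0 h
    by_cases hp : p x = true
    · simp only [List.foldl_cons, hp, if_pos]
      obtain ⟨h1, h2, h3⟩ := ih (PySem.Set.add s0 (f x)) (PySem.Set.nodup_add _ _ h)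
      refine ⟨h1, ?_, ?_⟩
      · intro y
        rw [h2 y, PySem.Set.mem_add]
        constructor
        · rintro ((hy | rfl) | ⟨z, hz, hpz, rfl⟩)
          · exact Or.inl hy
          · exact Or.inr ⟨x, by simp, hp, rfl⟩
          · exact Or.inr ⟨z, by simp [hz], hpz, rfl⟩
        · rintro (hy | ⟨z, hz, hpz, rfl⟩)
          · exact Or.inl (Or.inl hy)
          · rcases List.mem_cons.mp hz with rfl | hz
            · exact Or.inl (Or.inr rfl)
            · exact Or.inr ⟨z, hz, hpz, rfl⟩
      · refine le_trans h3 ?_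
        have : (PySem.Set.add s0 (f x)).length ≤ s0.length + 1 := by
          simp only [PySem.Set.add]; split <;> simp
        simp [List.filter_cons, hp]
        omega
    · simp only [List.foldl_cons, hp, if_neg, Bool.false_eq_true, not_false_iff, if_false]
      obtain ⟨h1, h2, h3⟩ := ih s0 h
      refine ⟨h1, ?_, ?_⟩
      · intro y
        rw [h2 y]
        constructor
        · rintro (hy | ⟨z, hz, hpz, rfl⟩)
          · exact Or.inl hy
          · exact Or.inr ⟨z, by simp [hz], hpz, rfl⟩
        · rintro (hy | ⟨z, hz, hpz, rfl⟩)
          · exact Or.inl hy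
          · rcases List.mem_cons.mp hz with rfl | hz
            · rw [hpz] at hp; exact absurd rfl hp
            · exact Or.inr ⟨z, hz, hpz, rfl⟩
      · refine le_trans h3 ?_
        simp [List.filter_cons, hp]

lemma ttt_pm_fold (b t : String) :
    (possible_moves b t).Nodup
    ∧ (∀ y, y ∈ possible_moves b t
          ↔ ∃ x ∈ PySem.List.enumerate b.toList 0, (x.2 == '.') = true ∧
              y = PySem.Str.slice b none (some x.1) ++ t ++ PySem.Str.slice b (some (x.1 + 1)) none)
    ∧ (possible_moves b t).length
        ≤ ((PySem.List.enumerate b.toList 0).filter (fun x => x.2 == '.')).length := by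
  have h := ttt_fold_add (fun x : Int × Char => x.2 == '.')
    (fun x => PySem.Str.slice b none (some x.1) ++ t ++ PySem.Str.slice b (some (x.1 + 1)) none)
    (PySem.List.enumerate b.toList 0) PySem.Set.empty (by simp [PySem.Set.empty])
  obtain ⟨h1, h2, h3⟩ := h
  refine ⟨h1, fun y => ?_, h3.trans (by simp [PySem.Set.empty])⟩
  have h2y := h2 y
  simp only [PySem.Set.empty, List.not_mem_nil, false_or] at h2y
  exact h2y

lemma ttt_pm_nodup (b t : String) : (possible_moves b t).Nodup := (ttt_pm_fold b t).1

lemma ttt_mem_pm {c b t : String} (hc : c ∈ possible_moves b t) :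
    ∃ (k : Nat) (h : k < b.toList.length), b.toList[k] = '.' ∧
      c.toList = b.toList.take k ++ t.toList ++ b.toList.drop (k+1) := by
  rw [(ttt_pm_fold b t).2.1 c] at hc
  obtain ⟨x, hx, hdot, rfl⟩ := hc
  rw [PySem.List.mem_enumerate_iff] at hx
  obtain ⟨k, hk, rfl⟩ := hx
  refine ⟨k, hk, by simpa using hdot, ?_⟩
  simp only [String.toList_append, PySem.Str.toList_slice, PySem.Chars.slice_eq_listSlice]
  rw [PySem.List.slice_to _ (by omega : (0:Int) ≤ 0 + (k:Int)),
      PySem.List.slice_from _ (by omega : (0:Int) ≤ 0 + (k:Int) + 1),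
      show ((0:Int) + (k:Int)).toNat = k from by omega,
      show ((0:Int) + (k:Int) + 1).toNat = k + 1 from by omega]

lemma ttt_dots_child {c b t : String} (ht : tttWFt t) (hc : c ∈ possible_moves b t) :
    tttDots c + 1 = tttDots b := by
  obtain ⟨k, hk, hdot, hcl⟩ := ttt_mem_pm hc
  have htl : t.toList.count '.' = 0 := by
    rcases ht with rfl | rfl <;> decide
  unfold tttDots
  rw [hcl]
  conv_rhs => rw [← List.take_append_drop k b.toList]
  rw [← List.getElem_cons_drop hk, hdot]
  simp [List.count_append, List.count_cons, htl]
  omega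

lemma ttt_enum_filter (c : Char) :
    ∀ (xs : List Char) (s : Int),
      ((PySem.List.enumerate xs s).filter (fun x => x.2 == c)).length = xs.count c := by
  intro xs
  induction xs with
  | nil => intro s; simp [PySem.List.enumerate]
  | cons x xs ih =>
    intro s
    rw [PySem.List.enumerate_cons, List.filter_cons, List.count_cons]
    by_cases hq : (x == c) = true <;> simp [hq, ih (s+1)]

lemma ttt_pm_len_le (b t : String) : (possible_moves b t).length ≤ tttDots b := by
  have h := (ttt_pm_fold b t).2.2
  rw [ttt_enum_filter] at h
  exact h

lemma ttt_pm_dots_zero {b : String} (h : tttDots b = 0) (t : String) : possible_moves b t = [] := by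
  have := ttt_pm_len_le b t
  rw [h, Nat.le_zero] at this
  exact List.eq_nil_iff_length_eq_zero.mpr this

-- ---- facts about tttW1 / tttWL ----
lemma ttt_mem_WL (steps : Int) (n : Nat) (l : List String) (t : String) (s : Int) (x : String) :
    x ∈ tttWL steps n l t s ↔ ∃ c ∈ l, x ∈ tttW1 steps n c t s := by
  induction l with
  | nil => simp [tttWL]
  | cons b bs ih => simp [tttWL, ih]

lemma ttt_WL_congr {steps : Int} {n m : Nat} {l : List String} {t : String} {s : Int}
    (h : ∀ c ∈ l, tttW1 steps n c t s = tttW1 steps m c t s) :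
    tttWL steps n l t s = tttWL steps m l t s := by
  induction l with
  | nil => simp [tttWL]
  | cons b bs ih =>
    simp only [tttWL]
    rw [h b (by simp), ih (fun c hcl => h c (by simp [hcl]))]

lemma ttt_W1_stable (steps : Int) :
    ∀ (n m : Nat) (b t : String) (s : Int), tttDots b ≤ n → tttDots b ≤ m → tttWFt t →
      tttW1 steps n b t s = tttW1 steps m b t s := by
  intro n
  induction n with
  | zero =>
    intro m b t s hn hm ht
    have hb : tttDots b = 0 := Nat.le_zero.mp hn
    cases m with
    | zero => rfl
    | succ m =>
      simp only [tttW1]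
      rw [ttt_pm_dots_zero hb]
      simp only [List.filter_nil, tttWL, tttXwinC, ttt_pm_dots_zero hb t, List.toFinset_nil]
      split <;> simp
  | succ n ih =>
    intro m b t s hn hm ht
    cases m with
    | zero =>
      have hb : tttDots b = 0 := Nat.le_zero.mp hm
      simp only [tttW1]
      rw [ttt_pm_dots_zero hb]
      simp only [List.filter_nil, tttWL, tttXwinC, ttt_pm_dots_zero hb t, List.toFinset_nil]
      split <;> simp
    | succ m =>
      simp only [tttW1]
      congr 1
      apply ttt_WL_congr
      intro c hcf
      have hcm : c ∈ possible_moves b t := List.mem_of_mem_filter hcf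
      have hd := ttt_dots_child ht hcm
      exact ih m c (tttFlip t) (s+1) (by omega) (by omega) (ttt_flip_wf t)

lemma ttt_W1_unfold {steps : Int} {b t : String} {s : Int}
    (hb : tttDots b ≤ 9) (ht : tttWFt t) :
    tttW1 steps 9 b t s = (if s + 1 = steps then tttXwinC b t else ∅) ∪
      tttWL steps 9 ((possible_moves b t).filter tttNF) (tttFlip t) (s + 1) := by
  rw [show (9:Nat) = 8 + 1 from rfl]
  simp only [tttW1]
  congr 1
  apply ttt_WL_congr
  intro c hcf
  have hcm : c ∈ possible_moves b t := List.mem_of_mem_filter hcf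
  have hd := ttt_dots_child ht hcm
  exact ttt_W1_stable steps 8 (8+1) c (tttFlip t) (s+1) (by omega) (by omega) (ttt_flip_wf t)

lemma ttt_W1_vanish (steps : Int) :
    ∀ (n : Nat) (b t : String) (s : Int), steps ≤ s → tttW1 steps n b t s = ∅ := by
  intro n
  induction n with
  | zero => intro b t s h; simp [tttW1]
  | succ n ih =>
    intro b t s h
    simp only [tttW1]
    rw [if_neg (by omega : ¬ (s + 1 = steps)), Finset.empty_union]
    ext x
    simp only [ttt_mem_WL, Finset.notMem_empty, iff_false, not_exists]
    intro c
    rintro ⟨hc, hx⟩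
    rw [ih c (tttFlip t) (s+1) (by omega)] at hx
    exact Finset.notMem_empty x hx

lemma ttt_mem_W1_XW (steps : Int) :
    ∀ (n : Nat) (b t : String) (s : Int) (x : String), x ∈ tttW1 steps n b t s → tttXW x = true := by
  intro n
  induction n with
  | zero => intro b t s x hx; simp [tttW1] at hx
  | succ n ih =>
    intro b t s x hx
    simp only [tttW1, Finset.mem_union] at hx
    rcases hx with hx | hx
    · by_cases hs : s + 1 = steps
      · rw [if_pos hs] at hx
        unfold tttXwinC at hx
        rw [List.mem_toFinset, List.mem_filter] at hx
        exact hx.2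
      · rw [if_neg hs] at hx
        exact absurd hx (Finset.notMem_empty x)
    · rw [ttt_mem_WL] at hx
      obtain ⟨c, hc, hx⟩ := hx
      exact ih c (tttFlip t) (s+1) x hx

-- ---- queue bookkeeping ----
lemma ttt_mem_bigW (steps : Int) (q : List (String × String × Int)) (x : String) :
    x ∈ tttBigW steps q ↔ ∃ e ∈ q, x ∈ tttWE steps e := by
  induction q with
  | nil => simp [tttBigW]
  | cons e q ih => simp [tttBigW] at ih ⊢; rw [ih]

lemma ttt_mem_U (steps : Int) (l : List String) (t : String) (s : Int) (x : String) :
    x ∈ tttU steps l t s ↔ ∃ b ∈ l, x ∈ tttW1 steps 9 b t s := by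
  induction l with
  | nil => simp [tttU]
  | cons b bs ih => simp [tttU] at ih ⊢; rw [ih]

lemma ttt_pop_none {front back : List (String × String × Int)}
    (h : tttPop front back = none) : front = [] ∧ back = [] := by
  cases front with
  | cons e fr => exact absurd h (by simp [tttPop])
  | nil =>
    cases hb : back.reverse with
    | nil =>
      refine ⟨rfl, ?_⟩
      have := congrArg List.reverse hb
      simpa using this
    | cons e fr =>
      unfold tttPop at h
      rw [hb] at h
      simp at h

lemma ttt_pop_some {front back fr bk : List (String × String × Int)} {e : String × String × Int}
    (h : tttPop front back = some (e, fr, bk)) :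
    front ++ back.reverse = e :: (fr ++ bk.reverse) := by
  cases front with
  | cons e' fr' =>
    unfold tttPop at h
    simp only [Option.some.injEq, Prod.mk.injEq] at h
    obtain ⟨rfl, rfl, rfl⟩ := h
    simp
  | nil =>
    cases hb : back.reverse with
    | nil =>
      unfold tttPop at h
      rw [hb] at h
      simp at h
    | cons e' fr' =>
      unfold tttPop at h
      rw [hb] at h
      simp only [Option.some.injEq, Prod.mk.injEq] at h
      obtain ⟨rfl, rfl, rfl⟩ := h
      simp [hb]

lemma ttt_M_nil {q : List (String × String × Int)} (h : tttM q = 0) : q = [] := by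
  cases q with
  | nil => rfl
  | cons e q =>
    exfalso
    unfold tttM at h
    rw [List.map_cons, List.sum_cons] at h
    have h10 : 0 < 10 ^ (tttDots e.1 + 1) := pow_pos (by norm_num) _
    omega

lemma ttt_card_step {α : Type} [DecidableEq α] (S X F : Finset α) :
    ((S ∪ X) \ F).card = (S \ F).card + (X \ (F ∪ S)).card := by
  have hset : (S ∪ X) \ F = (S \ F) ∪ (X \ (F ∪ S)) := by
    ext a
    simp only [Finset.mem_sdiff, Finset.mem_union]
    tauto
  rw [hset, Finset.card_union_of_disjoint]
  rw [Finset.disjoint_left]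
  intro a ha hb
  rw [Finset.mem_sdiff] at ha hb
  rw [Finset.mem_union] at hb
  tauto

lemma ttt_toFinset_add (F0 : PySem.Set String) (x : String) :
    (PySem.Set.add F0 x).toFinset = insert x F0.toFinset := by
  ext a
  rw [List.mem_toFinset, PySem.Set.mem_add, Finset.mem_insert, List.mem_toFinset]
  tauto

-- characterization of A's inner for-loop over the children of one popped board
set_option maxHeartbeats 1000000 in
lemma ttt_afold (steps : Int) (t : String) (s : Int) :
    ∀ (L : List String), L.Nodup →
    ∀ (q0 : List (String × String × Int)) (F0 : PySem.Set String), F0.Nodup → ∀ (c0 : Int),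
    ∃ F' : PySem.Set String,
      (L.foldl
        (fun (st : List (String × String × Int) × PySem.Set String × Int) child_node =>
          if !(goal_test child_node == "Not finished") then
            if !(PySem.Set.contains st.2.1 child_node) && goal_test child_node == "X wins"
                && s + 1 == steps then
              (st.1, PySem.Set.add st.2.1 child_node, st.2.2 + 1)
            else st
          else if t == "X" then ((child_node, "O", s + 1) :: st.1, st.2.1, st.2.2)
          else ((child_node, "X", s + 1) :: st.1, st.2.1, st.2.2))
        (q0, F0, c0))
      = ((L.filter tttNF).reverse.map (fun c => (c, tttFlip t, s + 1)) ++ q0, F',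
         c0 + if s + 1 = steps then (((L.filter tttXW).toFinset \ F0.toFinset).card : Int) else 0)
      ∧ F'.Nodup
      ∧ F'.toFinset = F0.toFinset ∪ (if s + 1 = steps then (L.filter tttXW).toFinset else ∅) := by
  intro L
  induction L with
  | nil =>
    intro _ q0 F0 hF0 c0
    refine ⟨F0, ?_, hF0, by split <;> simp⟩
    simp only [List.foldl_nil, List.filter_nil, List.reverse_nil, List.map_nil, List.nil_append,
      List.toFinset_nil, Finset.empty_sdiff, Finset.card_empty]
    split <;> simp
  | cons x L ih =>
    intro hnd q0 F0 hF0 c0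
    have hndL : L.Nodup := hnd.of_cons
    have hxL : x ∉ L := (List.nodup_cons.mp hnd).1
    set f := (fun (st : List (String × String × Int) × PySem.Set String × Int) child_node =>
          if !(goal_test child_node == "Not finished") then
            if !(PySem.Set.contains st.2.1 child_node) && goal_test child_node == "X wins"
                && s + 1 == steps then
              (st.1, PySem.Set.add st.2.1 child_node, st.2.2 + 1)
            else st
          else if t == "X" then ((child_node, "O", s + 1) :: st.1, st.2.1, st.2.2)
          else ((child_node, "X", s + 1) :: st.1, st.2.1, st.2.2)) with hf
    rw [List.foldl_cons]
    by_cases hNF : (goal_test x == "Not finished") = true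
    · -- ongoing child: gets enqueued
      have hNFt : tttNF x = true := hNF
      have hgte : goal_test x = "Not finished" := by simpa using hNF
      have hXWt : tttXW x = false := by unfold tttXW; rw [hgte]; decide
      have hflip : f (q0, F0, c0) x = ((x, tttFlip t, s + 1) :: q0, F0, c0) := by
        rw [hf]
        simp only [hNF, Bool.not_true, Bool.false_eq_true, if_false]
        unfold tttFlip
        by_cases ht : (t == "X") = true <;> simp [ht]
      rw [hflip]
      obtain ⟨F', hfold, hN, hT⟩ := ih hndL ((x, tttFlip t, s + 1) :: q0) F0 hF0 c0
      refine ⟨F', ?_, hN, ?_⟩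
      · rw [hfold]
        simp only [Prod.mk.injEq, List.filter_cons, hNFt, hXWt, if_true, Bool.false_eq_true,
          if_false, List.reverse_cons, List.map_append, List.map_cons, List.map_nil,
          List.append_assoc, List.singleton_append]
      · rw [hT]
        simp [List.filter_cons, hXWt]
    · -- terminal child
      have hNFf : tttNF x = false := by simpa [tttNF] using hNF
      have hgt : (goal_test x == "Not finished") = false := by simpa [tttNF] using hNF
      by_cases hs : s + 1 = steps
      · have hsb : ((s + 1 : Int) == steps) = true := by simp [hs]
        by_cases hXW : (goal_test x == "X wins") = true
        · have hXWt : tttXW x = true := hXW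
          by_cases hmem : PySem.Set.contains F0 x = true
          · -- already counted
            have hxF0 : x ∈ F0 := List.mem_of_elem_eq_true hmem
            have hred : f (q0, F0, c0) x = (q0, F0, c0) := by
              rw [hf]; simp [hgt, hmem, hxF0]
            rw [hred]
            obtain ⟨F', hfold, hN, hT⟩ := ih hndL q0 F0 hF0 c0
            refine ⟨F', ?_, hN, ?_⟩
            · rw [hfold]
              simp only [Prod.mk.injEq, List.filter_cons, hNFf, hXWt, Bool.false_eq_true, if_false,
                if_true, List.toFinset_cons, hs, if_pos]
              refine ⟨by trivial, by trivial, ?_⟩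
              rw [Finset.insert_sdiff_of_mem _ (by simpa using hxF0)]
            · rw [hT]
              simp only [List.filter_cons, hXWt, if_true, List.toFinset_cons, hs, if_pos]
              rw [Finset.union_insert, Finset.insert_eq_self.mpr]
              simp [hxF0]
          · -- newly counted
            have hxF0 : x ∉ F0 := fun hm => hmem (List.elem_eq_true_of_mem hm)
            have hred : f (q0, F0, c0) x = (q0, PySem.Set.add F0 x, c0 + 1) := by
              rw [hf]; simp [hgt, hmem, hXW, hsb, hxF0]
            rw [hred]
            have hnadd : List.Nodup (PySem.Set.add F0 x) := PySem.Set.nodup_add F0 x hF0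
            obtain ⟨F', hfold, hN, hT⟩ := ih hndL q0 (PySem.Set.add F0 x) hnadd (c0 + 1)
            have haddT := ttt_toFinset_add F0 x
            have hxS : x ∉ (L.filter tttXW).toFinset := by
              simp only [List.mem_toFinset]
              exact fun hmm => hxL (List.mem_of_mem_filter hmm)
            have hxF0' : x ∉ F0.toFinset := by simpa using hxF0
            refine ⟨F', ?_, hN, ?_⟩
            · rw [hfold]
              simp only [Prod.mk.injEq, List.filter_cons, hNFf, hXWt, Bool.false_eq_true, if_false,
                if_true, List.toFinset_cons, hs, if_pos, haddT]
              refine ⟨by trivial, by trivial, ?_⟩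
              rw [Finset.sdiff_insert_of_notMem hxS, Finset.insert_sdiff_of_notMem _ hxF0',
                Finset.card_insert_of_notMem (fun h => absurd (Finset.mem_sdiff.mp h).1 hxS)]
              push_cast
              ring
            · rw [hT, haddT]
              simp only [List.filter_cons, hXWt, if_true, List.toFinset_cons, hs, if_pos]
              rw [Finset.insert_union, Finset.union_insert]
        · -- not an X win
          have hXWt : tttXW x = false := by simpa [tttXW] using hXW
          have hred : f (q0, F0, c0) x = (q0, F0, c0) := by
            rw [hf]; simp [hgt, hXW]
          rw [hred]
          obtain ⟨F', hfold, hN, hT⟩ := ih hndL q0 F0 hF0 c0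
          refine ⟨F', ?_, hN, ?_⟩
          · rw [hfold]
            simp only [Prod.mk.injEq, List.filter_cons, hNFf, hXWt, Bool.false_eq_true, if_false]
          · rw [hT]
            simp [List.filter_cons, hXWt]
      · -- wrong depth
        have hsb : ((s + 1 : Int) == steps) = false := by simp [hs]
        have hred : f (q0, F0, c0) x = (q0, F0, c0) := by
          rw [hf]; simp [hgt, hsb]
        rw [hred]
        obtain ⟨F', hfold, hN, hT⟩ := ih hndL q0 F0 hF0 c0
        refine ⟨F', ?_, hN, ?_⟩
        · rw [hfold]
          simp only [Prod.mk.injEq, List.filter_cons, hNFf, Bool.false_eq_true, if_false, hs,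
            and_self]
        · rw [hT]
          simp [hs]

lemma ttt_bigW_cons (steps : Int) (e : String × String × Int) (q : List (String × String × Int)) :
    tttBigW steps (e :: q) = tttWE steps e ∪ tttBigW steps q := rfl

lemma ttt_bigW_append (steps : Int) (q1 q2 : List (String × String × Int)) :
    tttBigW steps (q1 ++ q2) = tttBigW steps q1 ∪ tttBigW steps q2 := by
  induction q1 with
  | nil => simp [tttBigW]
  | cons e q ih => simp only [List.cons_append, ttt_bigW_cons, ih, Finset.union_assoc]

lemma ttt_bigW_reverse (steps : Int) (q : List (String × String × Int)) :
    tttBigW steps q.reverse = tttBigW steps q := by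
  ext a
  rw [ttt_mem_bigW, ttt_mem_bigW]
  constructor <;> rintro ⟨e, he, hae⟩ <;> exact ⟨e, by simpa [List.mem_reverse] using he, hae⟩

lemma ttt_bigW_map (steps : Int) (l : List String) (t : String) (s : Int) :
    tttBigW steps (l.map (fun c => (c, t, s))) = tttWL steps 9 l t s := by
  induction l with
  | nil => simp [tttBigW, tttWL]
  | cons b bs ih =>
    rw [List.map_cons, ttt_bigW_cons, ih]
    simp only [tttWL, tttWE]

lemma ttt_WL_reverse (steps : Int) (n : Nat) (l : List String) (t : String) (s : Int) :
    tttWL steps n l.reverse t s = tttWL steps n l t s := by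
  ext a
  rw [ttt_mem_WL, ttt_mem_WL]
  constructor <;> rintro ⟨e, he, hae⟩ <;> exact ⟨e, by simpa [List.mem_reverse] using he, hae⟩

-- the main loop invariant of A
lemma ttt_loopA_spec (steps : Int) :
    ∀ (fuel : Nat) (front back : List (String × String × Int)) (F : PySem.Set String) (c : Int),
      (∀ e ∈ front ++ back.reverse, tttOK e) → F.Nodup →
      tttM (front ++ back.reverse) ≤ fuel →
      tttLoopA steps fuel front back F c
        = c + ((tttBigW steps (front ++ back.reverse) \ F.toFinset).card : Int) := by
  intro fuel
  induction fuel with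
  | zero =>
    intro front back F c hOK hF hM
    have hq : front ++ back.reverse = [] := ttt_M_nil (Nat.le_zero.mp hM)
    rw [hq]
    simp [tttLoopA, tttBigW]
  | succ fuel ih =>
    intro front back F c hOK hF hM
    rw [tttLoopA]
    cases hp : tttPop front back with
    | none =>
      obtain ⟨hf, hb⟩ := ttt_pop_none hp
      subst hf; subst hb
      simp [tttBigW]
    | some p =>
      obtain ⟨⟨b, t, s⟩, fr, bk⟩ := p
      have hq : front ++ back.reverse = (b, t, s) :: (fr ++ bk.reverse) := ttt_pop_some hp
      have hOKh : tttOK (b, t, s) := hOK _ (by rw [hq]; exact List.mem_cons_self ..)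
      obtain ⟨ht, hd⟩ := hOKh
      dsimp only at ht hd
      obtain ⟨F', hfold, hN, hT⟩ := ttt_afold steps t s (possible_moves b t)
        (ttt_pm_nodup b t) bk F hF c
      simp only []
      rw [hfold]
      -- the recursive call
      have hOK' : ∀ e ∈ fr ++ ((List.filter tttNF (possible_moves b t)).reverse.map
          (fun c => (c, tttFlip t, s + 1)) ++ bk).reverse, tttOK e := by
        intro e he
        rw [List.mem_append] at he
        rcases he with he | he
        · exact hOK e (by rw [hq]; exact List.mem_cons_of_mem _ (by simp [he]))
        · rw [List.reverse_append, List.mem_append] at he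
          rcases he with he | he
          · exact hOK e (by rw [hq]; exact List.mem_cons_of_mem _ (by simp [List.mem_reverse.mp he]))
          · rw [List.mem_reverse, List.mem_map] at he
            obtain ⟨cb, hcb, rfl⟩ := he
            have hcm : cb ∈ possible_moves b t :=
              List.mem_of_mem_filter (List.mem_reverse.mp hcb)
            have := ttt_dots_child ht hcm
            exact ⟨ttt_flip_wf t, by dsimp only; omega⟩
      have hM' : tttM (fr ++ ((List.filter tttNF (possible_moves b t)).reverse.map
          (fun c => (c, tttFlip t, s + 1)) ++ bk).reverse) ≤ fuel := by
        have hsplit : ∀ (l1 l2 : List (String × String × Int)), tttM (l1 ++ l2) = tttM l1 + tttM l2 := by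
          intro l1 l2; unfold tttM; rw [List.map_append, List.sum_append]
        have hrev : ∀ (l : List (String × String × Int)), tttM l.reverse = tttM l := by
          intro l; unfold tttM; rw [List.map_reverse, List.sum_reverse]
        have hnew : tttM ((List.filter tttNF (possible_moves b t)).reverse.map
            (fun c => (c, tttFlip t, s + 1))) ≤ 9 * 10 ^ tttDots b := by
          have hlen : ((List.filter tttNF (possible_moves b t)).reverse.map
              (fun c => (c, tttFlip t, s + 1))).length ≤ 9 := by
            have h1 : (List.filter tttNF (possible_moves b t)).length ≤ (possible_moves b t).length :=
              List.length_filter_le _ _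
            have h2 := ttt_pm_len_le b t
            simp only [List.length_map, List.length_reverse]
            omega
          have hall : ∀ x ∈ ((List.filter tttNF (possible_moves b t)).reverse.map
              (fun c => (c, tttFlip t, s + 1))).map (fun e => 10 ^ (tttDots e.1 + 1)),
              x ≤ 10 ^ tttDots b := by
            intro x hx
            rw [List.mem_map] at hx
            obtain ⟨e, he, rfl⟩ := hx
            rw [List.mem_map] at he
            obtain ⟨cb, hcb, rfl⟩ := he
            have hcm : cb ∈ possible_moves b t :=
              List.mem_of_mem_filter (List.mem_reverse.mp hcb)
            have := ttt_dots_child ht hcm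
            exact Nat.pow_le_pow_right (by norm_num) (by dsimp only; omega)
          unfold tttM
          calc _ ≤ (((List.filter tttNF (possible_moves b t)).reverse.map
                (fun c => (c, tttFlip t, s + 1))).map (fun e => 10 ^ (tttDots e.1 + 1))).length
                  • 10 ^ tttDots b := List.sum_le_card_nsmul _ _ hall
            _ = (((List.filter tttNF (possible_moves b t)).reverse.map
                (fun c => (c, tttFlip t, s + 1))).map (fun e => 10 ^ (tttDots e.1 + 1))).length
                  * 10 ^ tttDots b := smul_eq_mul _ _
            _ ≤ 9 * 10 ^ tttDots b :=
                Nat.mul_le_mul_right _ (by simpa using hlen)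
        have hMq := hM
        rw [hq] at hMq
        unfold tttM at hMq
        rw [List.map_cons, List.sum_cons] at hMq
        dsimp only at hMq
        have h10 : 0 < 10 ^ tttDots b := pow_pos (by norm_num) _
        have hpow : (10:Nat) ^ (tttDots b + 1) = 10 * 10 ^ tttDots b := pow_succ' 10 _
        rw [List.reverse_append, hsplit, hsplit, hrev, hrev]
        have hrest : tttM fr + tttM bk ≤ fuel + 1 - 10 ^ (tttDots b + 1) := by
          have h2 : tttM (fr ++ bk.reverse) = tttM fr + tttM bk := by rw [hsplit, hrev]
          unfold tttM at h2 ⊢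
          omega
        unfold tttM at hrest hnew ⊢
        omega
      rw [ih fr _ F' (c + _) hOK' hN hM']
      -- now pure finset algebra
      have hbigq : tttBigW steps (front ++ back.reverse)
          = (if s + 1 = steps then tttXwinC b t else ∅)
            ∪ (tttBigW steps (fr ++ ((List.filter tttNF (possible_moves b t)).reverse.map
                (fun c => (c, tttFlip t, s + 1)) ++ bk).reverse)) := by
        rw [hq]
        simp only [List.reverse_append, ttt_bigW_cons, ttt_bigW_append, ttt_bigW_reverse]
        rw [ttt_bigW_map, ttt_WL_reverse]
        have hWEh : tttWE steps (b, t, s)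
            = (if s + 1 = steps then tttXwinC b t else ∅)
              ∪ tttWL steps 9 (List.filter tttNF (possible_moves b t)) (tttFlip t) (s + 1) := by
          unfold tttWE
          exact ttt_W1_unfold hd ht
        rw [hWEh]
        ext a
        simp only [Finset.mem_union]
        tauto
      rw [hbigq, hT]
      rw [ttt_card_step]
      have hsel : (if s + 1 = steps then
            (((List.filter tttXW (possible_moves b t)).toFinset \ F.toFinset).card : Int) else 0)
          = (((if s + 1 = steps then tttXwinC b t else ∅) \ F.toFinset).card : Int) := by
        split <;> simp [tttXwinC]
      rw [hsel,
        show (List.filter tttXW (possible_moves b t)).toFinset = tttXwinC b t from rfl]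
      push_cast
      ring
  

lemma ttt_A_eq (steps : Int) :
    distinct_final_boards_X_wins steps = ((tttW1 steps 9 "........." "X" 0).card : Int) := by
  unfold distinct_final_boards_X_wins
  have hOK : ∀ e ∈ [((".........":String), ("X":String), (0:Int))] ++ List.reverse [], tttOK e := by
    intro e he
    simp only [List.reverse_nil, List.append_nil, List.mem_singleton] at he
    subst he
    exact ⟨Or.inl rfl, by decide⟩
  have hF : (PySem.Set.ofList ["........."]).Nodup := PySem.Set.nodup_ofList _
  have hM : tttM ([((".........":String), ("X":String), (0:Int))] ++ List.reverse []) ≤ 10000000000 := by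
    decide
  rw [ttt_loopA_spec steps 10000000000 [(".........", "X", 0)] [] (PySem.Set.ofList ["........."]) 0
    hOK hF hM]
  have hofl : PySem.Set.ofList [("........." : String)] = ["........."] := rfl
  rw [hofl]
  simp only [List.reverse_nil, List.append_nil, ttt_bigW_cons]
  have hnil : tttBigW steps [] = ∅ := rfl
  rw [hnil, Finset.union_empty]
  have hWE : tttWE steps ((".........":String), ("X":String), (0:Int))
      = tttW1 steps 9 "........." "X" 0 := rfl
  rw [hWE]
  have hni : ("........." : String) ∉ tttW1 steps 9 "........." "X" 0 := fun h =>
    absurd (ttt_mem_W1_XW steps 9 _ _ _ _ h) (by decide)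
  have hsd : tttW1 steps 9 "........." "X" 0 \ {"........."} = tttW1 steps 9 "........." "X" 0 := by
    ext x
    rw [Finset.mem_sdiff, Finset.mem_singleton]
    constructor
    · exact fun hx => hx.1
    · intro hx
      exact ⟨hx, fun hh => hni (hh ▸ hx)⟩
  rw [show (["........."] : List String).toFinset = {"........."} from rfl, hsd]
  ring

-- ---- B side ----
lemma ttt_next_spec (turn : String) :
    ∀ (fr : List String) (s0 : List String), s0.Nodup →
      (fr.foldl (fun nxt b =>
        (possible_moves b turn).foldl (fun nxt child =>
          if goal_test child == "Not finished" then PySem.Set.add nxt child else nxt) nxt) s0).Nodup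
      ∧ ∀ x, (x ∈ fr.foldl (fun nxt b =>
          (possible_moves b turn).foldl (fun nxt child =>
            if goal_test child == "Not finished" then PySem.Set.add nxt child else nxt) nxt) s0
          ↔ x ∈ s0 ∨ ∃ b ∈ fr, x ∈ (possible_moves b turn).filter tttNF) := by
  intro fr
  induction fr with
  | nil => intro s0 h; exact ⟨h, fun x => by simp⟩
  | cons b fr ih =>
    intro s0 h
    rw [List.foldl_cons]
    obtain ⟨h1, h2, _⟩ := ttt_fold_add (fun c => goal_test c == "Not finished") (fun c => c)
      (possible_moves b turn) s0 h
    obtain ⟨h3, h4⟩ := ih _ h1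
    refine ⟨h3, fun x => ?_⟩
    rw [h4 x, h2 x]
    simp only [List.mem_filter, List.mem_cons]
    constructor
    · rintro ((hs0 | ⟨xx, hxx, hp, rfl⟩) | ⟨b', hb', hmem, hp⟩)
      · exact Or.inl hs0
      · exact Or.inr ⟨b, Or.inl rfl, hxx, hp⟩
      · exact Or.inr ⟨b', Or.inr hb', hmem, hp⟩
    · rintro (hs0 | ⟨b', hb', hmem, hp⟩)
      · exact Or.inl (Or.inl hs0)
      · rcases hb' with rfl | hb'
        · exact Or.inl (Or.inr ⟨x, hmem, hp, rfl⟩)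
        · exact Or.inr ⟨b', hb', hmem, hp⟩

lemma ttt_wins_spec (turn : String) :
    ∀ (fr : List String) (s0 : List String), s0.Nodup →
      (fr.foldl (fun wins b =>
        (possible_moves b turn).foldl (fun wins child =>
          if goal_test child == "X wins" then PySem.Set.add wins child else wins) wins) s0).Nodup
      ∧ ∀ x, (x ∈ fr.foldl (fun wins b =>
          (possible_moves b turn).foldl (fun wins child =>
            if goal_test child == "X wins" then PySem.Set.add wins child else wins) wins) s0
          ↔ x ∈ s0 ∨ ∃ b ∈ fr, x ∈ (possible_moves b turn).filter tttXW) := by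
  intro fr
  induction fr with
  | nil => intro s0 h; exact ⟨h, fun x => by simp⟩
  | cons b fr ih =>
    intro s0 h
    rw [List.foldl_cons]
    obtain ⟨h1, h2, _⟩ := ttt_fold_add (fun c => goal_test c == "X wins") (fun c => c)
      (possible_moves b turn) s0 h
    obtain ⟨h3, h4⟩ := ih _ h1
    refine ⟨h3, fun x => ?_⟩
    rw [h4 x, h2 x]
    simp only [List.mem_filter, List.mem_cons]
    constructor
    · rintro ((hs0 | ⟨xx, hxx, hp, rfl⟩) | ⟨b', hb', hmem, hp⟩)
      · exact Or.inl hs0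
      · exact Or.inr ⟨b, Or.inl rfl, hxx, hp⟩
      · exact Or.inr ⟨b', Or.inr hb', hmem, hp⟩
    · rintro (hs0 | ⟨b', hb', hmem, hp⟩)
      · exact Or.inl (Or.inl hs0)
      · rcases hb' with rfl | hb'
        · exact Or.inl (Or.inr ⟨x, hmem, hp, rfl⟩)
        · exact Or.inr ⟨b', hb', hmem, hp⟩

lemma ttt_flip_turn (k : Int) :
    tttFlip (if PySem.Int.mod k 2 == 1 then "X" else "O")
      = (if PySem.Int.mod (k+1) 2 == 1 then "X" else "O") := by
  unfold tttFlip
  rw [PySem.Int.mod_eq_emod_of_pos (by norm_num), PySem.Int.mod_eq_emod_of_pos (by norm_num)]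
  rcases Int.emod_two_eq_zero_or_one k with h | h
  · have h1 : (k+1) % 2 = 1 := by omega
    rw [h, h1]
    decide
  · have h1 : (k+1) % 2 = 0 := by omega
    rw [h, h1]
    decide

lemma ttt_bloop_spec (steps : Int) :
    ∀ (n : Nat) (k : Int) (fr : PySem.Set String), fr.Nodup → (∀ b ∈ fr, tttDots b ≤ 9) →
      k + (n : Int) = steps →
      (match tttBLoop n k fr with
       | none => 0
       | some frontier =>
         PySem.Set.len (tttWins frontier (if PySem.Int.mod steps 2 == 1 then "X" else "O")))
      = ((tttU steps fr (if PySem.Int.mod k 2 == 1 then "X" else "O") (k - 1)).card : Int) := by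
  intro n
  induction n with
  | zero =>
    intro k fr hnd hdots hks
    have hk : k = steps := by push_cast at hks; omega
    subst hk
    have htw : tttWFt (if PySem.Int.mod k 2 == 1 then "X" else "O") := by
      split
      · exact Or.inl rfl
      · exact Or.inr rfl
    rw [show tttBLoop 0 k fr = some fr from rfl]
    show PySem.Set.len (tttWins fr (if PySem.Int.mod k 2 == 1 then "X" else "O")) = _
    obtain ⟨hN, hmem⟩ := ttt_wins_spec (if PySem.Int.mod k 2 == 1 then "X" else "O") fr
      PySem.Set.empty (by simp [PySem.Set.empty])
    have hmem' : ∀ x, x ∈ tttWins fr (if PySem.Int.mod k 2 == 1 then "X" else "O")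
        ↔ x ∈ (PySem.Set.empty : PySem.Set String) ∨ ∃ b ∈ fr,
          x ∈ (possible_moves b (if PySem.Int.mod k 2 == 1 then "X" else "O")).filter tttXW := hmem
    have hN' : (tttWins fr (if PySem.Int.mod k 2 == 1 then "X" else "O")).Nodup := hN
    have hlen : PySem.Set.len (tttWins fr (if PySem.Int.mod k 2 == 1 then "X" else "O"))
        = (((tttWins fr (if PySem.Int.mod k 2 == 1 then "X" else "O")).toFinset.card : Nat) : Int) := by
      rw [List.toFinset_card_of_nodup hN']
      rfl
    rw [hlen]
    congr 1
    have hfe : (tttWins fr (if PySem.Int.mod k 2 == 1 then "X" else "O")).toFinset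
        = tttU k fr (if PySem.Int.mod k 2 == 1 then "X" else "O") (k - 1) := by
      ext a
      rw [List.mem_toFinset, hmem' a, ttt_mem_U]
      simp only [PySem.Set.empty, List.not_mem_nil, false_or]
      constructor
      · rintro ⟨b, hb, ha⟩
        refine ⟨b, hb, ?_⟩
        rw [ttt_W1_unfold (hdots b hb) htw, Finset.mem_union,
          if_pos (by omega : k - 1 + 1 = k)]
        left
        rw [tttXwinC, List.mem_toFinset]
        exact ha
      · rintro ⟨b, hb, ha⟩
        rw [ttt_W1_unfold (hdots b hb) htw, Finset.mem_union,
          if_pos (by omega : k - 1 + 1 = k)] at ha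
        rcases ha with ha | ha
        · rw [tttXwinC, List.mem_toFinset] at ha
          exact ⟨b, hb, ha⟩
        · rw [ttt_mem_WL] at ha
          obtain ⟨cb, hcb, ha⟩ := ha
          rw [ttt_W1_vanish k 9 cb _ _ (by omega)] at ha
          exact absurd ha (Finset.notMem_empty a)
    rw [hfe]
  | succ n ih =>
    intro k fr hnd hdots hks
    have htw : tttWFt (if PySem.Int.mod k 2 == 1 then "X" else "O") := by
      split
      · exact Or.inl rfl
      · exact Or.inr rfl
    have hklt : k ≠ steps := by push_cast at hks; omega
    obtain ⟨hNn, hmemn⟩ := ttt_next_spec (if PySem.Int.mod k 2 == 1 then "X" else "O") fr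
      PySem.Set.empty (by simp [PySem.Set.empty])
    have hmem' : ∀ x, x ∈ tttNext fr (if PySem.Int.mod k 2 == 1 then "X" else "O")
        ↔ x ∈ (PySem.Set.empty : PySem.Set String) ∨ ∃ b ∈ fr,
          x ∈ (possible_moves b (if PySem.Int.mod k 2 == 1 then "X" else "O")).filter tttNF := hmemn
    have hNn' : (tttNext fr (if PySem.Int.mod k 2 == 1 then "X" else "O")).Nodup := hNn
    have hU : tttU steps fr (if PySem.Int.mod k 2 == 1 then "X" else "O") (k - 1)
        = tttU steps (tttNext fr (if PySem.Int.mod k 2 == 1 then "X" else "O"))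
            (if PySem.Int.mod (k+1) 2 == 1 then "X" else "O") (k + 1 - 1) := by
      ext a
      rw [ttt_mem_U, ttt_mem_U]
      have hkk : k - 1 + 1 = k := by omega
      have hkk2 : k + 1 - 1 = k := by omega
      constructor
      · rintro ⟨b, hb, ha⟩
        rw [ttt_W1_unfold (hdots b hb) htw, Finset.mem_union, if_neg (by omega : ¬ (k - 1 + 1 = steps)),
          ttt_mem_WL] at ha
        rcases ha with ha | ⟨cb, hcb, ha⟩
        · exact absurd ha (Finset.notMem_empty a)
        · refine ⟨cb, (hmem' cb).mpr (Or.inr ⟨b, hb, hcb⟩), ?_⟩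
          rw [hkk, ttt_flip_turn k] at ha
          rw [hkk2]
          exact ha
      · rintro ⟨cb, hcb, ha⟩
        rcases (hmem' cb).mp hcb with hemp | ⟨b, hb, hbf⟩
        · exact absurd hemp (by simp [PySem.Set.empty])
        · refine ⟨b, hb, ?_⟩
          rw [ttt_W1_unfold (hdots b hb) htw, Finset.mem_union,
            if_neg (by omega : ¬ (k - 1 + 1 = steps)), ttt_mem_WL]
          refine Or.inr ⟨cb, hbf, ?_⟩
          rw [hkk2] at ha
          rw [hkk, ttt_flip_turn k]
          exact ha
    have hdots' : ∀ b ∈ tttNext fr (if PySem.Int.mod k 2 == 1 then "X" else "O"), tttDots b ≤ 9 := by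
      intro cb hcb
      rcases (hmem' cb).mp hcb with hemp | ⟨b, hb, hbf⟩
      · exact absurd hemp (by simp [PySem.Set.empty])
      · have := ttt_dots_child htw (List.mem_of_mem_filter hbf)
        have := hdots b hb
        omega
    have hks' : (k + 1) + (n : Int) = steps := by push_cast at hks ⊢; omega
    have hrec := ih (k + 1) (tttNext fr (if PySem.Int.mod k 2 == 1 then "X" else "O")) hNn' hdots' hks'
    simp only [tttBLoop]
    by_cases hemp : (tttNext fr (if PySem.Int.mod k 2 == 1 then "X" else "O")).isEmpty
    · rw [if_pos hemp]
      have hnil : tttNext fr (if PySem.Int.mod k 2 == 1 then "X" else "O") = [] :=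
        List.isEmpty_iff.mp hemp
      rw [hU, hnil]
      rfl
    · rw [if_neg hemp]
      rw [hrec, hU]

lemma ttt_B_eq (steps : Int) :
    distinct_final_boards_X_wins_alt steps = ((tttW1 steps 9 "........." "X" 0).card : Int) := by
  unfold distinct_final_boards_X_wins_alt
  by_cases h1 : steps < 1
  · rw [if_pos h1, ttt_W1_vanish steps 9 _ _ _ (by omega)]
    simp
  · rw [if_neg h1]
    have hn : (1:Int) + (((steps - 1).toNat : Nat) : Int) = steps := by
      rw [Int.toNat_of_nonneg (by omega)]; ring
    have hdots0 : ∀ b ∈ PySem.Set.ofList [("........." : String)], tttDots b ≤ 9 := by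
      intro b hb
      rw [show PySem.Set.ofList [("........." : String)] = ["........."] from rfl,
        List.mem_singleton] at hb
      subst hb
      decide
    have hspec := ttt_bloop_spec steps (steps - 1).toNat 1 (PySem.Set.ofList ["........."])
      (PySem.Set.nodup_ofList _) hdots0 hn
    refine Eq.trans (by rfl) (hspec.trans ?_)
    have ht1 : (if PySem.Int.mod 1 2 == 1 then "X" else "O") = "X" := by decide
    rw [ht1]
    rw [show tttU steps (PySem.Set.ofList ["........."]) "X" (1 - 1)
      = tttW1 steps 9 "........." "X" (1 - 1) ∪ ∅ from rfl, Finset.union_empty,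
      show (1:Int) - 1 = 0 from by norm_num]

-- ===== VERDICT (by name: the statement is the Claim_ definition above) =====
theorem distinct_final_boards_X_wins_spec : Claim_equal_distinct_final_boards_X_wins := by
  intro steps _
  unfold Spec_distinct_final_boards_X_wins
  rw [ttt_A_eq, ttt_B_eq]
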